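-- pv_equiv track=rewrite | github.com/sled-group/Heuristic-Analytic-Reasoning | gradient-based/gradient-based-propara/src/data_utils.py | make_timestep_sequence
-- ===== SOURCE A (Python) =====
-- def make_timestep_sequence(question_tokens, sentence_tokens):
--     total_len = 2+len(question_tokens) + sum([len(sent) for sent in sentence_tokens])
--     timestep_ids = []
--     step0 = [0]*(len(question_tokens)+1) + [2]*(total_len-2-len(question_tokens)) + [0]
--     timestep_ids.append(step0)
--     for i, sent in enumerate(sentence_tokens):
--         this_step = [0]*(len(question_tokens)+1)
--         this_step += [1] * sum([len(s) for s in sentence_tokens[:i]])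
--         this_step += [2] * len(sent) + [3] * sum([len(s) for s in sentence_tokens[i+1:]]) + [0]
--         assert len(this_step) == total_len
--         timestep_ids.append(this_step)
--     return timestep_ids
-- ===== SOURCE B (Python) =====
-- def make_timestep_sequence(question_tokens, sentence_tokens):
--     q = len(question_tokens)
--     cum = [0]
--     for sent in sentence_tokens:
--         cum.append(cum[-1] + len(sent))
--     total = cum[-1]
--
--     def label(i, k):
--         # classify token position k for timestep i via the boundary table
--         if i == 0:
--             return 2
--         if k < cum[i - 1]:
--             return 1
--         if k < cum[i]:
--             return 2
--         return 3
--
--     return [[0] * (q + 1) + [label(i, k) for k in range(total)] + [0]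
--             for i in range(len(sentence_tokens) + 1)]
-- ===== Notes on version B (the rewrite author's own statement) =====
-- stated objective: alternative
-- what changed: B builds a cumulative boundary table of sentence lengths once and fills every cell by classifying its position k against the boundaries cum[i-1]/cum[i] (a per-cell threshold lookup), instead of A's per-row concatenation of replicated blocks sized by re-summing list slices.
import Mathlib
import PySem

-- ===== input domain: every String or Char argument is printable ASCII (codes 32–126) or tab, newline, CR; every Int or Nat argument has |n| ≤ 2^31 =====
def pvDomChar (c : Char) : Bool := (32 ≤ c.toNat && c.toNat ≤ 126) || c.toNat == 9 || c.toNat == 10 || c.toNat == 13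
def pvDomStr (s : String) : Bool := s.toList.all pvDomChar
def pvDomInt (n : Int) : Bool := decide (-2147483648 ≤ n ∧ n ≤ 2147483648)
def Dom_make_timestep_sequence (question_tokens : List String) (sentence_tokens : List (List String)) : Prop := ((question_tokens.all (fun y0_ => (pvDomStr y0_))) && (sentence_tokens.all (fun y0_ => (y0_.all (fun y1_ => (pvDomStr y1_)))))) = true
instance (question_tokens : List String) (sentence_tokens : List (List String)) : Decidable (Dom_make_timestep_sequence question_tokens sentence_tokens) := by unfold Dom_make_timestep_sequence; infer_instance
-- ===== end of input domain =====

-- B fills each cell by classifying its position against a cumulative-length boundary table,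
-- instead of A's per-row concatenation of replicated blocks sized by re-summing list slices
-- (objective: alternative construction).

-- ===== PORT A =====
def make_timestep_sequence (question_tokens : List String) (sentence_tokens : List (List String)) : List (List Int) :=
  let total_len : Nat := 2 + question_tokens.length + (sentence_tokens.map (fun sent => sent.length)).sum
  let step0 : List Int :=
    List.replicate (question_tokens.length + 1) (0 : Int)
      ++ List.replicate (total_len - 2 - question_tokens.length) (2 : Int) ++ [(0 : Int)]
  (PySem.List.enumerate sentence_tokens 0).foldl
    (fun acc p =>
      let this_step : List Int :=
        List.replicate (question_tokens.length + 1) (0 : Int)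
          ++ List.replicate ((PySem.List.slice sentence_tokens none (some p.1)).map (fun s => s.length)).sum (1 : Int)
          ++ List.replicate p.2.length (2 : Int)
          ++ List.replicate ((PySem.List.slice sentence_tokens (some (p.1 + 1)) none).map (fun s => s.length)).sum (3 : Int)
          ++ [(0 : Int)]
      -- the Python 'assert len(this_step) == total_len' always holds, so it is a no-op
      acc ++ [this_step])
    [step0]

-- ===== PORT B =====
def make_timestep_sequence_alt (question_tokens : List String) (sentence_tokens : List (List String)) : List (List Int) :=
  let q : Nat := question_tokens.length
  let cum : List Nat := sentence_tokens.foldl (fun c sent => c ++ [c.getLastD 0 + sent.length]) [0]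
  let total : Nat := cum.getLastD 0
  let label : Nat → Nat → Int := fun i k =>
    if i = 0 then 2
    else if k < cum.getD (i - 1) 0 then 1
    else if k < cum.getD i 0 then 2
    else 3
  (List.range (sentence_tokens.length + 1)).map (fun i =>
    List.replicate (q + 1) (0 : Int) ++ (List.range total).map (fun k => label i k) ++ [(0 : Int)])

-- ===== PRECONDITION & SPEC =====
def Spec_make_timestep_sequence (question_tokens : List String) (sentence_tokens : List (List String)) (out : List (List Int)) : Prop := out = make_timestep_sequence_alt question_tokens sentence_tokens
instance (question_tokens : List String) (sentence_tokens : List (List String)) (out : List (List Int)) : Decidable (Spec_make_timestep_sequence question_tokens sentence_tokens out) := by unfold Spec_make_timestep_sequence; infer_instance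

-- ===== CLAIM (what is proved, stated in full; the proofs are below) =====
def Claim_equal_make_timestep_sequence : Prop := ∀ (question_tokens : List String) (sentence_tokens : List (List String)), Dom_make_timestep_sequence question_tokens sentence_tokens → Spec_make_timestep_sequence question_tokens sentence_tokens (make_timestep_sequence question_tokens sentence_tokens)

-- ===== LEMMAS AND PROOFS =====

-- the row built for prefix length p, sentence length n, suffix length suf, q question tokens
def pvRow (q p n suf : Nat) : List Int :=
  List.replicate (q + 1) (0 : Int) ++ List.replicate p (1 : Int)
    ++ List.replicate n (2 : Int) ++ List.replicate suf (3 : Int) ++ [(0 : Int)]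

-- the tail rows, as a recursion over the sentence-length list with the running prefix p
def pvRows (q total : Nat) : List Nat → Nat → List (List Int)
  | [], _ => []
  | n :: rest, p => pvRow q p n (total - p - n) :: pvRows q total rest (p + n)

theorem pvA_map (q : Nat) (s : List (List String)) :
    ∀ (rest : List (List String)) (k : Nat), s.drop k = rest →
      (PySem.List.enumerate rest (k : Int)).map
        (fun p =>
          List.replicate (q + 1) (0 : Int)
            ++ List.replicate ((PySem.List.slice s none (some p.1)).map (fun t => t.length)).sum (1 : Int)
            ++ List.replicate p.2.length (2 : Int)
            ++ List.replicate ((PySem.List.slice s (some (p.1 + 1)) none).map (fun t => t.length)).sum (3 : Int)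
            ++ [(0 : Int)])
        = pvRows q (s.map (fun t => t.length)).sum (rest.map (fun t => t.length))
            (((s.take k).map (fun t => t.length)).sum) := by
  intro rest
  induction rest with
  | nil => intro k hk; simp [pvRows]
  | cons sent rest' ih =>
      intro k hk
      have hk' : s.drop (k + 1) = rest' := by
        rw [← List.drop_drop, hk]; simp
      have hcast : (k : Int) + 1 = ((k + 1 : Nat) : Int) := by push_cast; ring
      have hmapk : (s.map (fun t => t.length)).drop k
          = sent.length :: rest'.map (fun t => t.length) := by
        rw [← List.map_drop, hk]; simp
      have hsuf : (rest'.map (fun t => t.length)).sum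
          = (s.map (fun t => t.length)).sum - ((s.take k).map (fun t => t.length)).sum - sent.length := by
        have hsum : (s.map (fun t => t.length)).sum
            = ((s.map (fun t => t.length)).take k).sum + ((s.map (fun t => t.length)).drop k).sum := by
          rw [← List.sum_append, List.take_append_drop]
        have heq : ((s.take k).map (fun t => t.length)).sum
            = ((s.map (fun t => t.length)).take k).sum := by rw [List.map_take]
        have h2 := congrArg List.sum hmapk
        simp only [List.sum_cons] at h2
        omega
      have htake : (s.take (k + 1)).map (fun t => t.length)
          = (s.take k).map (fun t => t.length) ++ [sent.length] := by
        have hget : s[k]? = some sent := by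
          have := congrArg List.head? hk
          simpa [List.head?_drop] using this
        have : s.take (k + 1) = s.take k ++ [sent] := by
          rw [List.take_add_one, hget]; simp
        rw [this]; simp
      simp only [PySem.List.enumerate_cons, List.map_cons, pvRows, pvRow]
      rw [PySem.List.slice_to_natCast, hcast, PySem.List.slice_from_natCast, hk',
        ih (k + 1) hk', htake, hsuf]
      simp [List.sum_append]

-- the cumulative table B builds is the table of prefix sums
theorem pvCum_fold (lens : List Nat) :
    ∀ (acc : List Nat) (s : Nat), acc.getLastD 0 = s →
      lens.foldl (fun c n => c ++ [c.getLastD 0 + n]) acc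
        = acc ++ (List.range lens.length).map (fun i => s + (lens.take (i + 1)).sum) := by
  induction lens with
  | nil => intro acc s _; simp
  | cons n rest ih =>
      intro acc s hs
      simp only [List.foldl_cons, hs]
      rw [ih (acc ++ [s + n]) (s + n) (by simp)]
      simp only [List.length_cons, List.range_succ_eq_map, List.map_cons, List.map_map,
        List.take_succ_cons, List.sum_cons, List.take_zero, List.sum_nil, Nat.add_zero,
        List.append_assoc, List.singleton_append]
      congr 1
      simp only [List.cons.injEq]
      refine ⟨trivial, ?_⟩
      apply List.map_congr_left
      intro i _
      simp [Function.comp, Nat.add_assoc]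

theorem pvCum_eq (lens : List Nat) :
    lens.foldl (fun c n => c ++ [c.getLastD 0 + n]) [0]
      = (List.range (lens.length + 1)).map (fun i => (lens.take i).sum) := by
  rw [pvCum_fold lens [0] 0 rfl, List.range_succ_eq_map]
  simp [Function.comp]

theorem pvCum_getD (lens : List Nat) (i : Nat) (h : i ≤ lens.length) :
    (lens.foldl (fun c n => c ++ [c.getLastD 0 + n]) [0]).getD i 0 = (lens.take i).sum := by
  rw [pvCum_eq]
  have hlt : i < (List.range (lens.length + 1)).length := by simpa using Nat.lt_succ_of_le h
  rw [List.getD_eq_getElem _ _ (by simpa using hlt)]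
  simp

theorem pvCum_last (lens : List Nat) :
    (lens.foldl (fun c n => c ++ [c.getLastD 0 + n]) [0]).getLastD 0 = lens.sum := by
  rw [pvCum_eq, List.range_succ]
  simp

-- filling range total cell-by-cell with two thresholds gives the three replicated blocks
theorem pvThreshold (t a b : Nat) (hab : a ≤ b) (hbt : b ≤ t) :
    (List.range t).map (fun k => if k < a then (1 : Int) else if k < b then 2 else 3)
      = List.replicate a (1 : Int) ++ List.replicate (b - a) (2 : Int)
          ++ List.replicate (t - b) (3 : Int) := by
  apply List.ext_getElem
  · simp; omega
  · intro i h1 h2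
    simp only [List.getElem_map, List.getElem_range, List.getElem_append,
      List.getElem_replicate, List.length_replicate]
    split_ifs <;> simp_all <;> omega

theorem pvB_tail (q total : Nat) (cum : List Nat) (lens : List Nat)
    (hcum : ∀ i, i ≤ lens.length → cum.getD i 0 = (lens.take i).sum)
    (htot : total = lens.sum) :
    ∀ (rest : List Nat) (j : Nat), lens.drop j = rest →
      (List.range rest.length).map (fun i =>
          List.replicate (q + 1) (0 : Int)
            ++ (List.range total).map (fun k =>
                if j + i + 1 = 0 then (2 : Int)
                else if k < cum.getD (j + i + 1 - 1) 0 then 1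
                else if k < cum.getD (j + i + 1) 0 then 2
                else 3)
            ++ [(0 : Int)])
        = pvRows q total rest ((lens.take j).sum) := by
  intro rest
  induction rest with
  | nil => intro j _; simp [pvRows]
  | cons n rest' ih =>
      intro j hj
      have hjlt : j < lens.length := by
        have := congrArg List.length hj
        simp at this; omega
      have hget : lens[j]? = some n := by
        have := congrArg List.head? hj
        simpa [List.head?_drop] using this
      have htakesucc : (lens.take (j + 1)).sum = (lens.take j).sum + n := by
        have : lens.take (j + 1) = lens.take j ++ [n] := by
          rw [List.take_add_one, hget]; simp
        rw [this]; simp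
      have hj' : lens.drop (j + 1) = rest' := by
        rw [← List.drop_drop, hj]; simp
      have hb_le : (lens.take (j + 1)).sum ≤ total := by
        have hsplit : lens.sum = (lens.take (j + 1)).sum + (lens.drop (j + 1)).sum := by
          rw [← List.sum_append, List.take_append_drop]
        omega
      have ha_le : (lens.take j).sum ≤ (lens.take (j + 1)).sum := by omega
      have h1 : cum.getD j 0 = (lens.take j).sum := hcum j (by omega)
      have h2 : cum.getD (j + 1) 0 = (lens.take (j + 1)).sum := hcum (j + 1) (by omega)
      simp only [List.length_cons, List.range_succ_eq_map, List.map_cons, List.map_map, pvRows]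
      congr 1
      · -- head row: the threshold fill equals the three replicated blocks
        simp only [Nat.add_zero, Nat.add_sub_cancel, pvRow]
        rw [show (fun k => if j + 1 = 0 then (2 : Int)
              else if k < cum.getD j 0 then 1
              else if k < cum.getD (j + 1) 0 then 2 else 3)
            = (fun k => if k < (lens.take j).sum then (1 : Int)
              else if k < (lens.take (j + 1)).sum then 2 else 3) by
          funext k; rw [if_neg (by omega), h1, h2]]
        rw [pvThreshold total ((lens.take j).sum) ((lens.take (j + 1)).sum) ha_le hb_le]
        rw [show (lens.take (j + 1)).sum - (lens.take j).sum = n from by omega]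
        rw [show total - (lens.take (j + 1)).sum = total - (lens.take j).sum - n from by omega]
        simp [List.append_assoc]
      · rw [← htakesucc, ← ih (j + 1) hj']
        apply List.map_congr_left
        intro i _
        simp only [Function.comp]
        have h : j + (i + 1) + 1 = (j + 1) + i + 1 := by omega
        rw [h]

theorem make_timestep_sequence_eq (question_tokens : List String) (sentence_tokens : List (List String)) :
    make_timestep_sequence question_tokens sentence_tokens
      = make_timestep_sequence_alt question_tokens sentence_tokens := by
  unfold make_timestep_sequence make_timestep_sequence_alt
  simp only []
  set q := question_tokens.length with hq
  set lens := sentence_tokens.map (fun sent => sent.length) with hlens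
  set cum := sentence_tokens.foldl (fun c sent => c ++ [c.getLastD 0 + sent.length]) [0] with hcumdef
  have hcumfold : cum = lens.foldl (fun c n => c ++ [c.getLastD 0 + n]) [0] := by
    rw [hcumdef, hlens, List.foldl_map]
  have htot : cum.getLastD 0 = lens.sum := by rw [hcumfold]; exact pvCum_last lens
  have hcg : ∀ i, i ≤ lens.length → cum.getD i 0 = (lens.take i).sum := by
    intro i hi; rw [hcumfold]; exact pvCum_getD lens i hi
  -- A side
  rw [PySem.List.foldl_append_singleton_eq_map]
  have hA := pvA_map q sentence_tokens sentence_tokens 0 (by simp)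
  simp only [List.take_zero, List.map_nil, List.sum_nil, Nat.cast_zero] at hA
  rw [hA]
  -- B side
  have htail := pvB_tail q lens.sum cum lens hcg rfl lens 0 (by simp)
  simp only [List.take_zero, List.sum_nil] at htail
  have hlen : sentence_tokens.length = lens.length := by simp [hlens]
  rw [htot, hlen, List.range_succ_eq_map, List.map_cons, List.map_map, ← htail]
  simp only [List.singleton_append]
  congr 1
  · -- step 0
    have h0 : 2 + q + lens.sum - 2 - q = lens.sum := by omega
    rw [h0]
    simp [List.map_const']
  · apply List.map_congr_left
    intro i _
    simp [Function.comp]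

-- ===== VERDICT (by name: the statement is the Claim_ definition above) =====
theorem make_timestep_sequence_spec : Claim_equal_make_timestep_sequence := by
  intro q s _
  exact make_timestep_sequence_eq q s
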